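-- pv_equiv track=rewrite | github.com/Das-rebel/ChuckleNet | training/convert_standup_raw_to_word_level.py | extract_last_non_empty_clause_tokens
-- ===== SOURCE A (Python) =====
-- from typing import DefaultDict, Dict, Iterable, List, Optional, Sequence, Set, Tuple
--
-- def is_punctuation_token(token: str) -> bool:
--     return bool(token) and all(not char.isalnum() for char in token)
--
-- def extract_last_non_empty_clause_tokens(context_words: Sequence[str]) -> List[str]:
--     clause_tokens: List[List[str]] = [[]]
--     for token in context_words:
--         if is_punctuation_token(token):
--             clause_tokens.append([])
--             continue
--         clause_tokens[-1].append(token)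
--     non_empty = [clause for clause in clause_tokens if clause]
--     return list(non_empty[-1]) if non_empty else []
-- ===== SOURCE B (Python) =====
-- def is_punctuation_token(token: str) -> bool:
--     return bool(token) and all(not char.isalnum() for char in token)
--
--
-- def extract_last_non_empty_clause_tokens(context_words):
--     # Single backward scan: collect the trailing run of content tokens,
--     # skipping any trailing punctuation, then restore forward order.
--     tokens = []
--     for token in reversed(context_words):
--         if is_punctuation_token(token):
--             if tokens:
--                 break
--         else:
--             tokens.append(token)
--     tokens.reverse()
--     return tokens
-- ===== Notes on version B (the rewrite author's own statement) =====
-- stated objective: simpler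
-- what changed: Instead of building the full list of clauses left-to-right and filtering for the last non-empty one, B scans backward once, skipping trailing punctuation and collecting the last run of content tokens, stopping at the first earlier punctuation token.
import Mathlib
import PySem

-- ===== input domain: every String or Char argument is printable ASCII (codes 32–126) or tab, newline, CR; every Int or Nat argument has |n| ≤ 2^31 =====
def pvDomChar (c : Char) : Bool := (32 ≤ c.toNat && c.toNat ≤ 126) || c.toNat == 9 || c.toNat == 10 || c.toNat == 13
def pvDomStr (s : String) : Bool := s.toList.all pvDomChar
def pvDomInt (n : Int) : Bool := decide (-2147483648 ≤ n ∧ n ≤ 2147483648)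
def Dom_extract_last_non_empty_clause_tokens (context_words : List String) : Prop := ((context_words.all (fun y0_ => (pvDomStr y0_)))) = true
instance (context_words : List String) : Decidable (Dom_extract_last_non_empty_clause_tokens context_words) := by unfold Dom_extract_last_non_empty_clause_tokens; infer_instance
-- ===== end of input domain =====

-- B replaces A's build-all-clauses-then-filter pass by a single backward scan over the
-- trailing run of tokens (simpler; return value only — A mutates nothing observable).

-- ===== PORT A =====
-- is_punctuation_token: bool(token) and all(not char.isalnum() for char in token)
def pvIsPunct (token : String) : Bool :=
  !token.toList.isEmpty && token.toList.all (fun c => !(PySem.Chars.isalnum c))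

-- one iteration of A's for-loop over clause_tokens (append [] / append to last clause)
def pvStepA (acc : List (List String)) (token : String) : List (List String) :=
  if pvIsPunct token then acc ++ [[]]
  else acc.dropLast ++ [acc.getLastD [] ++ [token]]

def extract_last_non_empty_clause_tokens (context_words : List String) : List String :=
  let clause_tokens := context_words.foldl pvStepA [[]]
  let non_empty := clause_tokens.filter (fun clause => !clause.isEmpty)
  non_empty.getLastD []

-- ===== PORT B =====
-- B's backward loop: skip trailing punctuation, then collect the run of content tokens
def pvRevScan : List String → List String → List String
  | [], tokens => tokens
  | token :: rest, tokens =>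
    if pvIsPunct token then
      if tokens.isEmpty then pvRevScan rest tokens else tokens
    else pvRevScan rest (tokens ++ [token])

def extract_last_non_empty_clause_tokens_alt (context_words : List String) : List String :=
  (pvRevScan context_words.reverse []).reverse

-- ===== PRECONDITION & SPEC =====
def Spec_extract_last_non_empty_clause_tokens (context_words : List String) (out : List String) : Prop := out = extract_last_non_empty_clause_tokens_alt context_words
instance (context_words : List String) (out : List String) : Decidable (Spec_extract_last_non_empty_clause_tokens context_words out) := by unfold Spec_extract_last_non_empty_clause_tokens; infer_instance

-- ===== CLAIM (what is proved, stated in full; the proofs are below) =====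
def Claim_equal_extract_last_non_empty_clause_tokens : Prop := ∀ (context_words : List String), Dom_extract_last_non_empty_clause_tokens context_words → Spec_extract_last_non_empty_clause_tokens context_words (extract_last_non_empty_clause_tokens context_words)

-- ===== LEMMAS AND PROOFS =====

-- B with a nonempty accumulator just extends it with the run of content tokens
theorem pvRevScan_ne (l : List String) (tokens : List String) (h : tokens ≠ []) :
    pvRevScan l tokens = tokens ++ l.takeWhile (fun t => !pvIsPunct t) := by
  induction l generalizing tokens with
  | nil => simp [pvRevScan]
  | cons t rest ih =>
    by_cases hp : pvIsPunct t = true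
    · simp [pvRevScan, hp, List.isEmpty_iff, h]
    · simp only [Bool.not_eq_true] at hp
      simp [pvRevScan, hp, ih (tokens ++ [t]) (by simp)]

-- B from the empty accumulator = takeWhile after dropWhile
theorem pvRevScan_nil (l : List String) :
    pvRevScan l [] = (l.dropWhile pvIsPunct).takeWhile (fun t => !pvIsPunct t) := by
  induction l with
  | nil => simp [pvRevScan]
  | cons t rest ih =>
    by_cases hp : pvIsPunct t = true
    · simp [pvRevScan, hp, ih]
    · simp only [Bool.not_eq_true] at hp
      simp [pvRevScan, hp, pvRevScan_ne rest [t] (by simp)]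

-- getLastD of a snoc is its last element
theorem pvGetLastD_snoc {α : Type} (l : List α) (a d : α) : (l ++ [a]).getLastD d = a := by
  simp

-- A's running last clause is the trailing run of content tokens
theorem foldl_stepA_getLastD (xs : List String) :
    (xs.foldl pvStepA [[]]).getLastD [] =
      (xs.reverse.takeWhile (fun t => !pvIsPunct t)).reverse := by
  induction xs using List.reverseRecOn with
  | nil => simp
  | append_singleton xs t ih =>
    rw [List.foldl_append, List.foldl_cons, List.foldl_nil]
    by_cases hp : pvIsPunct t = true
    · simp [pvStepA, hp]
    · simp only [Bool.not_eq_true] at hp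
      rw [pvStepA, if_neg (by simp [hp]), pvGetLastD_snoc, ih]
      simp [hp]

-- A's answer (last non-empty clause) equals B's closed description
theorem foldl_stepA_answer (xs : List String) :
    ((xs.foldl pvStepA [[]]).filter (fun clause => !clause.isEmpty)).getLastD [] =
      ((xs.reverse.dropWhile pvIsPunct).takeWhile (fun t => !pvIsPunct t)).reverse := by
  induction xs using List.reverseRecOn with
  | nil => simp
  | append_singleton xs t ih =>
    rw [List.foldl_append, List.foldl_cons, List.foldl_nil]
    by_cases hp : pvIsPunct t = true
    · rw [pvStepA, if_pos hp, List.filter_append]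
      simp only [List.filter_cons, List.isEmpty_nil, Bool.not_true, Bool.false_eq_true,
        if_false, List.filter_nil, List.append_nil]
      rw [ih]
      simp [hp]
    · simp only [Bool.not_eq_true] at hp
      rw [pvStepA, if_neg (by simp [hp]), List.filter_append]
      have hne : ((xs.foldl pvStepA [[]]).getLastD [] ++ [t]).isEmpty = false := by simp
      simp only [List.filter_cons, hne, Bool.not_false, if_true, List.filter_nil]
      rw [pvGetLastD_snoc, foldl_stepA_getLastD xs]
      simp [hp]

-- ===== VERDICT (by name: the statement is the Claim_ definition above) =====
theorem extract_last_non_empty_clause_tokens_spec : Claim_equal_extract_last_non_empty_clause_tokens := by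
  intro cw _
  show _ = _
  simp only [extract_last_non_empty_clause_tokens, extract_last_non_empty_clause_tokens_alt]
  rw [pvRevScan_nil, foldl_stepA_answer]
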